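-- pv_equiv track=rewrite | github.com/daniel-reich/turbo-robot | tftN3EdkSPfXxzWpi_4.py | sentence_searcher
-- ===== SOURCE A (Python) =====
-- def sentence_searcher(txt, n):
--   n = (len(txt.split()) + n)%len(txt.split())
--   sentences = []
--   count = 0
--   for i in txt.split("."):
--     i = i.strip()
--     i += "."
--     sentences.append(i.split())
--   for i in sentences:
--     if count <= n and n < count + len(i):
--       return " ".join(i)
--     else:
--       count += len(i)
-- ===== SOURCE B (Python) =====
-- def sentence_searcher(txt, n):
--     w = len(txt.split())
--     n = (w + n) % w
--     parts = [(seg.strip() + ".").split() for seg in txt.split(".")]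
--     # prefix[i] = number of words in the first i sentences
--     prefix = [0]
--     last = 0
--     for p in parts:
--         last += len(p)
--         prefix.append(last)
--     # binary search: first index lo with prefix[lo + 1] > n
--     lo, hi = 0, len(parts)
--     while lo < hi:
--         mid = (lo + hi) // 2
--         if prefix[mid + 1] <= n:
--             lo = mid + 1
--         else:
--             hi = mid
--     if lo < len(parts) and n < prefix[lo + 1]:
--         return " ".join(parts[lo])
--     return None
-- ===== Notes on version B (the rewrite author's own statement) =====
-- stated objective: alternative
-- what changed: A's linear scan that accumulates a running word count over the sentence lists is replaced by building a prefix-sum table of per-sentence word counts once and locating the containing sentence with a hand-written binary search (bisect_right).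
-- outside the precondition, e.g. on sentence_searcher(' b . a .', -1): A returns None, B returns None; on sentence_searcher('', 0): A raises ZeroDivisionError, B raises ZeroDivisionError
import Mathlib
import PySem

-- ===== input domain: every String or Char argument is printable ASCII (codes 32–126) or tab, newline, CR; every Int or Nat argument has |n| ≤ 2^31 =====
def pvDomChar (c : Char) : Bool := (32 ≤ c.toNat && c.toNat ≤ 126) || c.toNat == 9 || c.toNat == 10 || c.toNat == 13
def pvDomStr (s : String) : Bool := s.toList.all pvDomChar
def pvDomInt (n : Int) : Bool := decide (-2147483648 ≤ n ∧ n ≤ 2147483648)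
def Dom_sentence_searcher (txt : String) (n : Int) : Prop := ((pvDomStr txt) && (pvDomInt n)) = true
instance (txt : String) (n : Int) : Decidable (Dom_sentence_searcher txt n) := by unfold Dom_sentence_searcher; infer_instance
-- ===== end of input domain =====

-- B replaces A's linear scan over per-sentence word counts by a prefix-sum table plus a
-- hand-written binary search (bisect_right) locating the sentence containing the n-th word.


-- ===== PORT A =====
-- i += "." on code points (exact: String append, done on toList to stay kernel-reducible)
def pvDot (s : String) : String := String.ofList (s.toList ++ ['.'])

-- the word list of one "."-segment: (seg.strip() + ".").split()
def pvSeg (seg : String) : List String := PySem.Str.split₀ (pvDot (PySem.Str.strip seg))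

-- A's second loop: first sentence i with count <= n < count + len(i); the fall-through
-- (Python's None) is rendered as "" and excluded by Pre_sentence_searcher.
def pvLoopA (n : Int) (count : Int) : List (List String) → String
  | [] => ""
  | i :: rest =>
      if count ≤ n ∧ n < count + (i.length : Int) then PySem.Str.join " " i
      else pvLoopA n (count + (i.length : Int)) rest

def sentence_searcher (txt : String) (n : Int) : String :=
  pvLoopA
    (PySem.Int.mod (((PySem.Str.split₀ txt).length : Int) + n) ((PySem.Str.split₀ txt).length : Int))
    0
    (((PySem.Str.split? txt ".").getD []).foldl (fun acc seg => acc ++ [pvSeg seg]) [])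

-- ===== PORT B =====
-- the list comprehension of Source B
def pvParts (txt : String) : List (List String) :=
  ((PySem.Str.split? txt ".").getD []).map pvSeg

-- Source B's prefix loop (last is Python's running `last`; the produced list is prefix[1:])
def pvPrefixTail (last : Int) : List (List String) → List Int
  | [] => []
  | p :: rest => (last + (p.length : Int)) :: pvPrefixTail (last + (p.length : Int)) rest

-- Source B's while-loop: first lo with prefix[lo+1] > n; `fuel` is only a structural
-- termination device (any fuel ≥ hi - lo runs the loop to completion, see pvBsearch_spec)
def pvBsearch (pref : List Int) (n : Int) : Nat → Nat → Nat → Nat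
  | 0, lo, _ => lo
  | fuel + 1, lo, hi =>
    if lo < hi then
      if pref.getD ((lo + hi) / 2 + 1) 0 ≤ n then pvBsearch pref n fuel ((lo + hi) / 2 + 1) hi
      else pvBsearch pref n fuel lo ((lo + hi) / 2)
    else lo

-- the final `if lo < len(parts) and n < prefix[lo + 1]` of Source B (prefix = 0 :: pvPrefixTail 0 parts)
def pvAnswer (parts : List (List String)) (m : Int) : String :=
  if pvBsearch (0 :: pvPrefixTail 0 parts) m parts.length 0 parts.length < parts.length ∧
      m < (0 :: pvPrefixTail 0 parts).getD
            (pvBsearch (0 :: pvPrefixTail 0 parts) m parts.length 0 parts.length + 1) 0 then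
    PySem.Str.join " " (parts.getD (pvBsearch (0 :: pvPrefixTail 0 parts) m parts.length 0 parts.length) [])
  else ""

def sentence_searcher_alt (txt : String) (n : Int) : String :=
  pvAnswer (pvParts txt)
    (PySem.Int.mod (((PySem.Str.split₀ txt).length : Int) + n) ((PySem.Str.split₀ txt).length : Int))

-- ===== PRECONDITION & SPEC =====
-- Pre_ excludes txt without words (Python A raises ZeroDivisionError) and the inputs where the
-- reduced word index n falls beyond the total sentence word count, on which A falls through and
-- returns None — not a value of the declared str type.
def Pre_sentence_searcher (txt : String) (n : Int) : Prop :=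
  0 < (PySem.Str.split₀ txt).length ∧
  PySem.Int.mod (((PySem.Str.split₀ txt).length : Int) + n) ((PySem.Str.split₀ txt).length : Int)
    < ((pvParts txt).map (fun p => (p.length : Int))).sum
instance (txt : String) (n : Int) : Decidable (Pre_sentence_searcher txt n) := by
  unfold Pre_sentence_searcher; infer_instance

def pvWitness_sentence_searcher : String × Int := ("a b. c.", 2)

def Spec_sentence_searcher (txt : String) (n : Int) (out : String) : Prop := out = sentence_searcher_alt txt n
instance (txt : String) (n : Int) (out : String) : Decidable (Spec_sentence_searcher txt n out) := by unfold Spec_sentence_searcher; infer_instance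

-- ===== CLAIM (what is proved, stated in full; the proofs are below) =====
def Claim_equal_sentence_searcher : Prop := ∀ (txt : String) (n : Int), Dom_sentence_searcher txt n → Pre_sentence_searcher txt n → Spec_sentence_searcher txt n (sentence_searcher txt n)

-- ===== LEMMAS AND PROOFS =====

-- cumulative word count of the first j sentences
def pvSL (parts : List (List String)) (j : Nat) : Int :=
  ((parts.take j).map (fun p => (p.length : Int))).sum

theorem pvSL_zero (parts : List (List String)) : pvSL parts 0 = 0 := rfl

theorem pvSL_cons (p : List String) (rest : List (List String)) (j : Nat) :
    pvSL (p :: rest) (j + 1) = (p.length : Int) + pvSL rest j := by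
  simp [pvSL]

theorem pvSL_mono (parts : List (List String)) {j k : Nat} (h : j ≤ k) :
    pvSL parts j ≤ pvSL parts k := by
  induction parts generalizing j k with
  | nil => simp [pvSL]
  | cons p rest ih =>
      cases j with
      | zero =>
          cases k with
          | zero => simp
          | succ k =>
              rw [pvSL_zero, pvSL_cons]
              have := ih (Nat.zero_le k)
              rw [pvSL_zero] at this
              positivity
      | succ j =>
          cases k with
          | zero => omega
          | succ k =>
              rw [pvSL_cons, pvSL_cons]
              have := ih (Nat.succ_le_succ_iff.mp h)
              omega

theorem pvPrefixTail_getD (parts : List (List String)) (c : Int) (j : Nat)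
    (h : j < parts.length) :
    (pvPrefixTail c parts).getD j 0 = c + pvSL parts (j + 1) := by
  induction parts generalizing c j with
  | nil => simp at h
  | cons p rest ih =>
      cases j with
      | zero => simp [pvPrefixTail, pvSL_cons, pvSL_zero]
      | succ j =>
          simp only [pvPrefixTail, List.getD_cons_succ]
          rw [ih _ j (by simpa using h), pvSL_cons]
          ring

theorem pvSL_succ (parts : List (List String)) (r : Nat) (h : r < parts.length) :
    pvSL parts (r + 1) = pvSL parts r + (parts[r].length : Int) := by
  have h' : r < (parts.map (fun p => (p.length : Int))).length := by simpa using h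
  simp only [pvSL, List.map_take]
  rw [List.take_add_one, List.getElem?_eq_getElem h']
  simp

theorem pvBsearch_spec (parts : List (List String)) (m : Int) :
    ∀ (fuel lo hi : Nat), hi - lo ≤ fuel → lo ≤ hi → hi ≤ parts.length →
    (∀ j < lo, pvSL parts (j + 1) ≤ m) →
    (∀ j, hi ≤ j → j < parts.length → m < pvSL parts (j + 1)) →
    lo ≤ pvBsearch (0 :: pvPrefixTail 0 parts) m fuel lo hi ∧
    pvBsearch (0 :: pvPrefixTail 0 parts) m fuel lo hi ≤ hi ∧
    (∀ j < pvBsearch (0 :: pvPrefixTail 0 parts) m fuel lo hi, pvSL parts (j + 1) ≤ m) ∧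
    (∀ j, pvBsearch (0 :: pvPrefixTail 0 parts) m fuel lo hi ≤ j → j < parts.length →
        m < pvSL parts (j + 1)) := by
  intro fuel
  induction fuel with
  | zero =>
      intro lo hi hk hle hhi hlo hup
      have : lo = hi := by omega
      subst this
      rw [pvBsearch]
      exact ⟨le_refl _, le_refl _, hlo, fun j hj hjl => hup j (by omega) hjl⟩
  | succ fuel ih =>
      intro lo hi hk hle hhi hlo hup
      by_cases hlh : lo < hi
      · have hget : (0 :: pvPrefixTail 0 parts).getD ((lo + hi) / 2 + 1) 0
            = pvSL parts ((lo + hi) / 2 + 1) := by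
          rw [List.getD_cons_succ, pvPrefixTail_getD _ _ _ (by omega)]
          ring
        rw [pvBsearch]
        simp only [hget, hlh, if_pos]
        by_cases hc : pvSL parts ((lo + hi) / 2 + 1) ≤ m
        · rw [if_pos hc]
          obtain ⟨h1, h2, h3, h4⟩ := ih ((lo + hi) / 2 + 1) hi (by omega) (by omega) hhi
            (fun j hj => le_trans (pvSL_mono parts (by omega)) hc) hup
          exact ⟨by omega, h2, h3, h4⟩
        · rw [if_neg hc]
          obtain ⟨h1, h2, h3, h4⟩ := ih lo ((lo + hi) / 2) (by omega) (by omega) (by omega) hlo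
            (fun j hj hjl => lt_of_lt_of_le (lt_of_not_ge hc) (pvSL_mono parts (by omega)))
          exact ⟨h1, by omega, h3, h4⟩
      · rw [pvBsearch]
        simp only [hlh, if_neg, not_false_iff]
        exact ⟨le_refl _, hle, hlo, fun j hj hjl => hup j (by omega) hjl⟩

theorem pvLoopA_skip (m : Int) :
    ∀ (r : Nat) (parts : List (List String)) (c : Int), r ≤ parts.length →
    (∀ j < r, c + pvSL parts (j + 1) ≤ m) →
    pvLoopA m c parts = pvLoopA m (c + pvSL parts r) (parts.drop r) := by
  intro r
  induction r with
  | zero => intro parts c _ _; simp [pvSL_zero]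
  | succ r ih =>
      intro parts c hr hskip
      cases parts with
      | nil => simp at hr
      | cons p rest =>
          have h0 : c + (p.length : Int) ≤ m := by
            have := hskip 0 (Nat.succ_pos r)
            rw [pvSL_cons, pvSL_zero] at this
            omega
          rw [pvLoopA, if_neg (by omega)]
          rw [ih rest (c + (p.length : Int)) (by simpa using hr)
            (fun j hj => by have := hskip (j + 1) (by omega); rw [pvSL_cons] at this; omega)]
          rw [pvSL_cons, List.drop_succ_cons]
          ring_nf

-- the heart of the equivalence: on any sentence list, A's linear scan agrees with
-- B's binary search over the prefix sums, for 0 ≤ m < total word count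
theorem pvLoopA_eq_pvAnswer (parts : List (List String)) (m : Int)
    (hm0 : 0 ≤ m) (hTot : m < pvSL parts parts.length) :
    pvLoopA m 0 parts = pvAnswer parts m := by
  obtain ⟨h1, h2, h3, h4⟩ := pvBsearch_spec parts m parts.length 0 parts.length (by omega)
    (Nat.zero_le _) le_rfl (fun j hj => absurd hj (Nat.not_lt_zero j))
    (fun j hj hjl => absurd hjl (by omega))
  by_cases hr : pvBsearch (0 :: pvPrefixTail 0 parts) m parts.length 0 parts.length < parts.length
  · have hcnt : pvSL parts (pvBsearch (0 :: pvPrefixTail 0 parts) m parts.length 0 parts.length) ≤ m := by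
      cases h : pvBsearch (0 :: pvPrefixTail 0 parts) m parts.length 0 parts.length with
      | zero => simpa [pvSL_zero] using hm0
      | succ r => exact h3 r (by omega)
    have habove := h4 _ le_rfl hr
    rw [pvLoopA_skip m _ parts 0 (le_of_lt hr) (fun j hj => by
      have := h3 j hj; omega)]
    rw [List.drop_eq_getElem_cons hr, pvLoopA, if_pos
      ⟨by omega, by have := pvSL_succ parts _ hr; omega⟩]
    unfold pvAnswer
    rw [if_pos ⟨hr, by
      rw [List.getD_cons_succ, pvPrefixTail_getD _ _ _ hr]
      omega⟩]
    rw [List.getD_eq_getElem _ _ hr]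
  · have hre : pvBsearch (0 :: pvPrefixTail 0 parts) m parts.length 0 parts.length = parts.length := by
      omega
    -- impossible: every prefix count would be ≤ m, contradicting m < total
    exfalso
    cases hl : parts.length with
    | zero => rw [hl, pvSL_zero] at hTot; omega
    | succ l =>
        have := h3 l (by omega)
        rw [← hl] at this
        omega

theorem pvFoldl_aux (l : List String) :
    ∀ acc, l.foldl (fun acc seg => acc ++ [pvSeg seg]) acc = acc ++ l.map pvSeg := by
  induction l with
  | nil => intro acc; simp
  | cons s rest ih => intro acc; simp [List.foldl_cons, ih]

theorem pvSentences_foldl (txt : String) :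
    ((PySem.Str.split? txt ".").getD []).foldl (fun acc seg => acc ++ [pvSeg seg]) []
      = pvParts txt := by
  rw [pvFoldl_aux, List.nil_append, pvParts]

theorem pvTotal_eq (txt : String) :
    pvSL (pvParts txt) (pvParts txt).length
      = ((pvParts txt).map (fun p => (p.length : Int))).sum := by
  rw [pvSL, List.take_length]

-- ===== VERDICT (by name: the statement is the Claim_ definition above) =====
theorem sentence_searcher_spec : Claim_equal_sentence_searcher := by
  intro txt n _ hpre
  obtain ⟨hW, hTot⟩ := hpre
  unfold Spec_sentence_searcher sentence_searcher sentence_searcher_alt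
  rw [pvSentences_foldl]
  exact pvLoopA_eq_pvAnswer _ _
    (PySem.Int.mod_nonneg _ (by exact_mod_cast hW))
    (by rw [pvTotal_eq]; exact hTot)
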